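-- pv_equiv track=rewrite | github.com/AndreBFarias/protocolo-ouroboros | src/transform/pagamentos_cruzados.py | contar_pagamentos_cruzados
-- ===== SOURCE A (Python) =====
-- from typing import Any, Iterable, Optional
--
-- def contar_pagamentos_cruzados(transacoes: Iterable[dict[str, Any]]) -> dict[str, int]:
--     """Conta transações cruzadas vs alinhadas no universo de Impostos.
--
--     Retorna dict com chaves:
--       - ``total_impostos``: total de transações com categoria Impostos.
--       - ``com_devedora``: subset com ``pessoa_devedora`` populado.
--       - ``cruzados``: subset onde ``pessoa_pagadora != pessoa_devedora``.
--       - ``sem_match``: subset com categoria Impostos mas sem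
--         ``pessoa_devedora`` (candidatos a drift se proporção alta).
--
--     Usado pela sentinela e pelo widget do dashboard.
--     """
--     total = 0
--     com_devedora = 0
--     cruzados = 0
--     sem_match = 0
--     for t in transacoes:
--         if not isinstance(t, dict):
--             continue
--         if (t.get("categoria") or "").strip().lower() != "impostos":
--             continue
--         total += 1
--         devedora = t.get("pessoa_devedora")
--         pagadora = t.get("pessoa_pagadora") or t.get("quem")
--         if devedora is None:
--             sem_match += 1
--             continue
--         com_devedora += 1
--         if pagadora != devedora:
--             cruzados += 1
--     return {
--         "total_impostos": total,
--         "com_devedora": com_devedora,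
--         "cruzados": cruzados,
--         "sem_match": sem_match,
--     }
-- ===== SOURCE B (Python) =====
-- def contar_pagamentos_cruzados(transacoes):
--     """Filter-then-aggregate re-implementation: materialize the Impostos
--     transactions once, then derive each counter by a separate aggregation;
--     sem_match is obtained arithmetically as total - com_devedora."""
--     items = [t for t in transacoes
--              if isinstance(t, dict)
--              and (t.get("categoria") or "").strip().lower() == "impostos"]
--     pairs = [(t.get("pessoa_devedora"), t.get("pessoa_pagadora") or t.get("quem"))
--              for t in items]
--     total = len(items)
--     com_devedora = sum(1 for d, _ in pairs if d is not None)
--     cruzados = sum(1 for d, p in pairs if d is not None and p != d)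
--     return {
--         "total_impostos": total,
--         "com_devedora": com_devedora,
--         "cruzados": cruzados,
--         "sem_match": total - com_devedora,
--     }
-- ===== Notes on version B (the rewrite author's own statement) =====
-- stated objective: alternative
-- what changed: Replaces A's fused single-pass four-counter accumulator loop with filter-then-aggregate: the Impostos transactions are materialized once, each counter comes from its own aggregation over that list, and sem_match is derived arithmetically as total - com_devedora instead of being counted.
import Mathlib
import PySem

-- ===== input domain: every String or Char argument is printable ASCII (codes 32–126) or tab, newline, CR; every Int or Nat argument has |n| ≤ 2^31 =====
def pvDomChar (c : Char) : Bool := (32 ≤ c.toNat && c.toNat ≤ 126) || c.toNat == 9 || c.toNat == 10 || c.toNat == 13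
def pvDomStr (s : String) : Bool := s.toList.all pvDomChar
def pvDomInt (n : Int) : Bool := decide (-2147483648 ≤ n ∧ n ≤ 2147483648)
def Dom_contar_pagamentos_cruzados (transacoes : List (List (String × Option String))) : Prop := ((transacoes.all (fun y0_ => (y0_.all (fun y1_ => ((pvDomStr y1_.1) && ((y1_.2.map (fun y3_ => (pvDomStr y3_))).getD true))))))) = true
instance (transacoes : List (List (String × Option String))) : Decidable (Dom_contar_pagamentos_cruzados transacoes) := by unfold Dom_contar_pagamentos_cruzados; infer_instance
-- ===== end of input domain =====

-- B changes the decomposition only (filter once, then separate aggregations; sem_match by arithmetic); same O(n) cost.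

-- shared value-extraction helpers (exact Python semantics)
-- t.get(k): first-match association-list lookup; a present key may itself hold None
def pvLookup (t : List (String × Option String)) (k : String) : Option String :=
  match t.find? (fun p => p.1 == k) with
  | some p => p.2
  | none => none

-- Python 'x or y' where x is Optional[str], result a str ('' and None are falsy)
def pvOrStr (o : Option String) (d : String) : String :=
  match o with
  | some s => if s = "" then d else s
  | none => d

-- Python 'x or y' where both are Optional[str]
def pvOrOpt (a b : Option String) : Option String :=
  match a with
  | some s => if s = "" then b else some s
  | none => b

-- ===== PORT A =====
-- the 'isinstance(t, dict)' guard is always true under the type convention, so it is omitted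
def contar_pagamentos_cruzados (transacoes : List (List (String × Option String))) : List (String × Int) :=
  let st := transacoes.foldl (fun (acc : Int × Int × Int × Int) t =>
    let (total, com_devedora, cruzados, sem_match) := acc
    if PySem.Str.lower (PySem.Str.strip (pvOrStr (pvLookup t "categoria") "")) ≠ "impostos" then
      (total, com_devedora, cruzados, sem_match)
    else
      let total := total + 1
      let devedora := pvLookup t "pessoa_devedora"
      let pagadora := pvOrOpt (pvLookup t "pessoa_pagadora") (pvLookup t "quem")
      match devedora with
      | none => (total, com_devedora, cruzados, sem_match + 1)
      | some d =>
        (total, com_devedora + 1,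
         if pagadora ≠ some d then cruzados + 1 else cruzados, sem_match)) (0, 0, 0, 0)
  [("total_impostos", st.1), ("com_devedora", st.2.1),
   ("cruzados", st.2.2.1), ("sem_match", st.2.2.2)]

-- ===== PORT B =====
def pvIsImposto (t : List (String × Option String)) : Bool :=
  PySem.Str.lower (PySem.Str.strip (pvOrStr (pvLookup t "categoria") "")) == "impostos"

def contar_pagamentos_cruzados_alt (transacoes : List (List (String × Option String))) : List (String × Int) :=
  let items := transacoes.filter pvIsImposto
  let pairs := items.map (fun t =>
    (pvLookup t "pessoa_devedora", pvOrOpt (pvLookup t "pessoa_pagadora") (pvLookup t "quem")))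
  let total : Int := items.length
  let com_devedora : Int := pairs.countP (fun p => p.1.isSome)
  let cruzados : Int := pairs.countP (fun p => p.1.isSome && p.2 != p.1)
  [("total_impostos", total), ("com_devedora", com_devedora),
   ("cruzados", cruzados), ("sem_match", total - com_devedora)]

-- ===== PRECONDITION & SPEC =====
def Spec_contar_pagamentos_cruzados (transacoes : List (List (String × Option String))) (out : List (String × Int)) : Prop := out = contar_pagamentos_cruzados_alt transacoes
instance (transacoes : List (List (String × Option String))) (out : List (String × Int)) : Decidable (Spec_contar_pagamentos_cruzados transacoes out) := by unfold Spec_contar_pagamentos_cruzados; infer_instance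

-- ===== CLAIM (what is proved, stated in full; the proofs are below) =====
def Claim_equal_contar_pagamentos_cruzados : Prop := ∀ (transacoes : List (List (String × Option String))), Dom_contar_pagamentos_cruzados transacoes → Spec_contar_pagamentos_cruzados transacoes (contar_pagamentos_cruzados transacoes)

-- ===== LEMMAS AND PROOFS =====

-- the loop body of A, named for the invariant lemma
def pvBodyA (acc : Int × Int × Int × Int) (t : List (String × Option String)) : Int × Int × Int × Int :=
  let (total, com_devedora, cruzados, sem_match) := acc
  if PySem.Str.lower (PySem.Str.strip (pvOrStr (pvLookup t "categoria") "")) ≠ "impostos" then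
    (total, com_devedora, cruzados, sem_match)
  else
    let total := total + 1
    let devedora := pvLookup t "pessoa_devedora"
    let pagadora := pvOrOpt (pvLookup t "pessoa_pagadora") (pvLookup t "quem")
    match devedora with
    | none => (total, com_devedora, cruzados, sem_match + 1)
    | some d =>
      (total, com_devedora + 1,
       if pagadora ≠ some d then cruzados + 1 else cruzados, sem_match)

def pvPair (t : List (String × Option String)) : Option String × Option String :=
  (pvLookup t "pessoa_devedora", pvOrOpt (pvLookup t "pessoa_pagadora") (pvLookup t "quem"))

-- B-side aggregates as functions of the list
def pvTot (ts : List (List (String × Option String))) : Int := (ts.filter pvIsImposto).length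
def pvCom (ts : List (List (String × Option String))) : Int :=
  ((ts.filter pvIsImposto).map pvPair).countP (fun p => p.1.isSome)
def pvCru (ts : List (List (String × Option String))) : Int :=
  ((ts.filter pvIsImposto).map pvPair).countP (fun p => p.1.isSome && p.2 != p.1)

theorem pvLoop_inv (ts : List (List (String × Option String))) :
    ∀ a b c d : Int,
      ts.foldl pvBodyA (a, b, c, d)
        = (a + pvTot ts, b + pvCom ts, c + pvCru ts, d + (pvTot ts - pvCom ts)) := by
  induction ts with
  | nil => intro a b c d; simp [pvTot, pvCom, pvCru]
  | cons t ts ih =>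
    intro a b c d
    simp only [List.foldl_cons]
    by_cases h : pvIsImposto t
    · have hcond : PySem.Str.lower (PySem.Str.strip (pvOrStr (pvLookup t "categoria") "")) = "impostos" := by
        simpa [pvIsImposto] using h
      rcases hdev : pvLookup t "pessoa_devedora" with _ | dv
      · have hb : pvBodyA (a, b, c, d) t = (a + 1, b, c, d + 1) := by
          simp only [pvBodyA, hcond, hdev, ne_eq, not_true_eq_false, if_false]
        rw [hb, ih]
        simp only [pvTot, pvCom, pvCru, List.filter_cons_of_pos h, List.map_cons,
          List.countP_cons, pvPair, hdev, Option.isSome_none, List.length_cons,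
          Bool.false_and, if_neg (by simp : ¬ (false = true))]
        push_cast
        simp only [Prod.mk.injEq]
        refine ⟨by ring, by ring, by ring, by ring⟩
      · by_cases hp : pvOrOpt (pvLookup t "pessoa_pagadora") (pvLookup t "quem") = some dv
        · have hb : pvBodyA (a, b, c, d) t = (a + 1, b + 1, c, d) := by
            simp only [pvBodyA, hcond, hdev, hp, ne_eq, not_true_eq_false, if_false]
          rw [hb, ih]
          simp only [pvTot, pvCom, pvCru, List.filter_cons_of_pos h, List.map_cons,
            List.countP_cons, pvPair, hdev, hp, Option.isSome_some, List.length_cons,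
            Bool.true_and, bne_self_eq_false, if_neg (by simp : ¬ (false = true))]
          push_cast
          simp only [Prod.mk.injEq]
          refine ⟨by ring, by ring, by ring, by ring⟩
        · have hb : pvBodyA (a, b, c, d) t = (a + 1, b + 1, c + 1, d) := by
            simp only [pvBodyA, hcond, hdev, ne_eq, not_true_eq_false, if_false]
            simp [hp]
          rw [hb, ih]
          have hbne : ((pvOrOpt (pvLookup t "pessoa_pagadora") (pvLookup t "quem") != some dv) = true) := by
            simpa using hp
          simp only [pvTot, pvCom, pvCru, List.filter_cons_of_pos h, List.map_cons,
            List.countP_cons, pvPair, hdev, Option.isSome_some, List.length_cons,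
            Bool.true_and, hbne]
          push_cast
          simp only [Prod.mk.injEq]
          refine ⟨by ring, by ring, by ring, by ring⟩
    · have hnb : pvIsImposto t = false := by simpa using h
      have hcond : PySem.Str.lower (PySem.Str.strip (pvOrStr (pvLookup t "categoria") "")) ≠ "impostos" := by
        simpa [pvIsImposto] using hnb
      have hb : pvBodyA (a, b, c, d) t = (a, b, c, d) := by
        simp only [pvBodyA, if_pos hcond]
      rw [hb, ih]
      simp [pvTot, pvCom, pvCru, List.filter_cons_of_neg, hnb]

-- ===== VERDICT (by name: the statement is the Claim_ definition above) =====
theorem contar_pagamentos_cruzados_spec : Claim_equal_contar_pagamentos_cruzados := by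
  intro ts _
  show contar_pagamentos_cruzados ts = contar_pagamentos_cruzados_alt ts
  have h := pvLoop_inv ts 0 0 0 0
  simp only [contar_pagamentos_cruzados, contar_pagamentos_cruzados_alt]
  have hb : (fun (acc : Int × Int × Int × Int) t =>
      let (total, com_devedora, cruzados, sem_match) := acc
      if PySem.Str.lower (PySem.Str.strip (pvOrStr (pvLookup t "categoria") "")) ≠ "impostos" then
        (total, com_devedora, cruzados, sem_match)
      else
        let total := total + 1
        let devedora := pvLookup t "pessoa_devedora"
        let pagadora := pvOrOpt (pvLookup t "pessoa_pagadora") (pvLookup t "quem")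
        match devedora with
        | none => (total, com_devedora, cruzados, sem_match + 1)
        | some d =>
          (total, com_devedora + 1,
           if pagadora ≠ some d then cruzados + 1 else cruzados, sem_match)) = pvBodyA := rfl
  rw [hb, h]
  simp only [zero_add]
  rfl
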